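-- pv_equiv track=rewrite | github.com/Ic4r0/advent_of_code2015 | days/day_11.py | check_repeated_characters
-- ===== SOURCE A (Python) =====
-- def check_repeated_characters(password: str) -> bool:
--     """ Check if there are more than 2 cases of repeating characters
--
--     :param password: password to check
--     :return: check
--     """
--     idx = 0
--     repetitions = 0
--     while idx < len(password) - 1:
--         first = ord(password[idx])
--         second = ord(password[idx + 1])
--         if first == second:
--             repetitions += 1
--             idx += 1
--         idx += 1
--     return repetitions > 1
-- ===== SOURCE B (Python) =====
-- from itertools import groupby
--
--
-- def check_repeated_characters(password: str) -> bool: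
--     """ Check if there are more than 2 cases of repeating characters
--
--     :param password: password to check
--     :return: check
--     """
--     return sum(len(list(g)) // 2 for _, g in groupby(password)) > 1
-- ===== Notes on version B (the rewrite author's own statement) =====
-- stated objective: idiomatic
-- what changed: Replaced the greedy index-stepping while loop over ord values by an itertools.groupby pass: split into maximal runs of equal characters and sum len(run)//2 non-overlapping pairs.
import Mathlib
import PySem

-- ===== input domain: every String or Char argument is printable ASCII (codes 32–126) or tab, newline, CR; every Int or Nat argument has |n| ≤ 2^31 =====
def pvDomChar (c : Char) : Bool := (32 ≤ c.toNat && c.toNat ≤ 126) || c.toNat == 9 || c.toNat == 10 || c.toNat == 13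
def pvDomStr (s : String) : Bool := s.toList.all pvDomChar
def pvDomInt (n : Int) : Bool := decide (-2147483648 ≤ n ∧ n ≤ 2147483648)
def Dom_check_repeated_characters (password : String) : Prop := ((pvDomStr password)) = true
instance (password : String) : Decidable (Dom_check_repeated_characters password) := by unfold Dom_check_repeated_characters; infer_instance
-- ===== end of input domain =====

-- B replaces A's greedy index-stepping scan by a groupby pass: sum len(run)//2 over maximal runs (idiomatic, same cost).

-- ===== PORT A =====
-- A's while loop: idx advances by 2 on a match (skip the pair), by 1 otherwise.
-- `ord(x) == ord(y)` is character equality (ord is injective), ported as `c1 = c2`.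
def pvALoop : List Char → Int → Int
  | c1 :: c2 :: rest, reps =>
      if c1 = c2 then pvALoop rest (reps + 1) else pvALoop (c2 :: rest) reps
  | _, reps => reps

def check_repeated_characters (password : String) : Bool :=
  decide (pvALoop password.toList 0 > 1)

-- ===== PORT B =====
-- itertools.groupby: lengths of the maximal runs of equal characters, in order.
def pvRunLengths : List Char → List Nat
  | [] => []
  | c :: rest =>
      (1 + (rest.takeWhile (fun d => d = c)).length) ::
        pvRunLengths (rest.dropWhile (fun d => d = c))
termination_by l => l.length
decreasing_by
  simp only [List.length_cons]
  exact Nat.lt_succ_of_le (List.length_dropWhile_le _ _)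

def check_repeated_characters_alt (password : String) : Bool :=
  decide (((pvRunLengths password.toList).map (fun L => L / 2)).sum > 1)

-- ===== PRECONDITION & SPEC =====
def Spec_check_repeated_characters (password : String) (out : Bool) : Prop := out = check_repeated_characters_alt password
instance (password : String) (out : Bool) : Decidable (Spec_check_repeated_characters password out) := by unfold Spec_check_repeated_characters; infer_instance

-- ===== CLAIM (what is proved, stated in full; the proofs are below) =====
def Claim_equal_check_repeated_characters : Prop := ∀ (password : String), Dom_check_repeated_characters password → Spec_check_repeated_characters password (check_repeated_characters password)

-- ===== LEMMAS AND PROOFS =====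

def pvPairSum (l : List Char) : Nat := ((pvRunLengths l).map (fun L => L / 2)).sum

-- peeling one char of the leading c-run off `rest` does not change the pair sum decomposition
theorem pvPairSum_split (c : Char) (rest : List Char) :
    pvPairSum rest = (rest.takeWhile (fun d => d = c)).length / 2 +
      pvPairSum (rest.dropWhile (fun d => d = c)) := by
  match rest with
  | [] => simp [pvPairSum, pvRunLengths]
  | c2 :: r2 =>
    by_cases h : c2 = c
    · subst h
      simp only [List.takeWhile, List.dropWhile, decide_true, List.length_cons]
      simp only [pvPairSum, pvRunLengths]
      simp only [List.map_cons, List.sum_cons]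
      omega
    · simp [pvPairSum, List.takeWhile, List.dropWhile, h]

theorem pvPairSum_pair (c : Char) (rest : List Char) :
    pvPairSum (c :: c :: rest) = 1 + pvPairSum rest := by
  have hs := pvPairSum_split c rest
  simp only [pvPairSum, pvRunLengths] at *
  simp only [List.takeWhile, List.dropWhile, decide_true, List.map_cons, List.sum_cons,
    List.length_cons] at *
  omega

theorem pvPairSum_ne (c1 c2 : Char) (rest : List Char) (h : c1 ≠ c2) :
    pvPairSum (c1 :: c2 :: rest) = pvPairSum (c2 :: rest) := by
  have h' : ¬ (c2 = c1) := fun e => h e.symm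
  simp [pvPairSum, pvRunLengths, List.takeWhile, List.dropWhile, h']

theorem pvALoop_eq (l : List Char) (reps : Int) :
    pvALoop l reps = reps + (pvPairSum l : Int) := by
  induction l, reps using pvALoop.induct with
  | case1 c rest reps ih =>
      rw [pvALoop, if_pos rfl, ih, pvPairSum_pair]
      push_cast
      ring
  | case2 c1 c2 rest reps h ih =>
      rw [pvALoop, if_neg h, ih, pvPairSum_ne _ _ _ h]
  | case3 l reps h =>
      match l with
      | [] => simp [pvALoop, pvPairSum, pvRunLengths]
      | [c] => simp [pvALoop, pvPairSum, pvRunLengths]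
      | c1 :: c2 :: rest => exact absurd rfl (fun e => h c1 c2 rest e)

-- ===== VERDICT (by name: the statement is the Claim_ definition above) =====
theorem check_repeated_characters_spec : Claim_equal_check_repeated_characters := by
  intro password _
  unfold Spec_check_repeated_characters check_repeated_characters check_repeated_characters_alt
  rw [pvALoop_eq]
  simp only [zero_add, decide_eq_decide]
  exact_mod_cast Iff.rfl
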